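-- pv_equiv track=rewrite | github.com/petrakol/ScopeBench | scopebench/policy/backends/python_backend.py | _has_read_ancestor
-- ===== SOURCE A (Python) =====
-- from typing import Dict, List, Optional, Set, Tuple
--
-- SWE_READ_TOOLS = {"git_read", "file_read"}
--
-- def _has_read_ancestor(
--     step_id: str, depends_on: Dict[str, List[str]], tool_by_id: Dict[str, Optional[str]]
-- ) -> bool:
--     stack = list(depends_on.get(step_id, []))
--     seen: Set[str] = set()
--     while stack:
--         node = stack.pop()
--         if node in seen:
--             continue
--         seen.add(node)
--         if tool_by_id.get(node) in SWE_READ_TOOLS: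
--             return True
--         stack.extend(depends_on.get(node, []))
--     return False
-- ===== SOURCE B (Python) =====
-- from typing import Dict, List, Optional, Set, Tuple
--
-- SWE_READ_TOOLS = {"git_read", "file_read"}
--
-- def _has_read_ancestor(
--     step_id: str, depends_on: Dict[str, List[str]], tool_by_id: Dict[str, Optional[str]]
-- ) -> bool:
--     # Breadth-first saturation: compute the full set of (proper) ancestors level
--     # by level, then scan it once for a read tool.
--     frontier = list(depends_on.get(step_id, []))
--     reached = set(frontier)
--     while frontier:
--         new = []
--         for n in frontier:
--             for c in depends_on.get(n, []):
--                 if c not in reached: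
--                     reached.add(c)
--                     new.append(c)
--         frontier = new
--     return any(tool_by_id.get(n) in SWE_READ_TOOLS for n in reached)
-- ===== Notes on version B (the rewrite author's own statement) =====
-- stated objective: alternative
-- what changed: Replaced the LIFO-stack DFS with early return by a breadth-first level-set saturation that first computes the complete set of reachable ancestors and then scans it once for a read tool.
import Mathlib
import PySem

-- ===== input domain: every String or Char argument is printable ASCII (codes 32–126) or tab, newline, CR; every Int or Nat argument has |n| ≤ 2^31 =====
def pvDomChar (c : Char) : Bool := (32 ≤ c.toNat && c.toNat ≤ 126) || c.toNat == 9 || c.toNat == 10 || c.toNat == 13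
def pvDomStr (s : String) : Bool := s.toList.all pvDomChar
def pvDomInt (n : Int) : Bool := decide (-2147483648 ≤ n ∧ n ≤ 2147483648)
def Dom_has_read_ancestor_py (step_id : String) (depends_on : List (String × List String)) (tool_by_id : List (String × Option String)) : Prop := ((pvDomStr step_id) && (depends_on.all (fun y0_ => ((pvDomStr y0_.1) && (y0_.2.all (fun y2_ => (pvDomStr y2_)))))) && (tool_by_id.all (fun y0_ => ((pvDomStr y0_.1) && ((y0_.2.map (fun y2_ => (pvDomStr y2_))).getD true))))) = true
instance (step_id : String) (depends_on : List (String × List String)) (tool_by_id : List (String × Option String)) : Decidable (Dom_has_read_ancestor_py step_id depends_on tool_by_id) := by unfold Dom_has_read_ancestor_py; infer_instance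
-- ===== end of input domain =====

-- B replaces A's LIFO-stack DFS with early exit by a breadth-first level-set
-- saturation followed by one scan of the reached set (alternative algorithm,
-- same asymptotic cost).


-- ===== PORT A =====

-- SWE_READ_TOOLS = {"git_read", "file_read"}
def pvReadTools : PySem.Set String := PySem.Set.ofList ["git_read", "file_read"]

-- depends_on.get(n, [])
def pvGetDeps (dep : List (String × List String)) (n : String) : List String :=
  (PySem.Dict.mk dep).getD n []

-- tool_by_id.get(n) in SWE_READ_TOOLS  (None is in no set of strings)
def pvIsRead (tool : List (String × Option String)) (n : String) : Bool :=
  match (PySem.Dict.mk tool).getD n none with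
  | some t => pvReadTools.contains t
  | none => false

-- the while-stack loop of A; fuel only makes the recursion total (proven sufficient)
def pvLoopA (dep : List (String × List String)) (tool : List (String × Option String)) :
    Nat → List String → PySem.Set String → Bool
  | 0, _, _ => false
  | fuel + 1, stack, seen =>
    match stack.getLast? with
    | none => false                                  -- while stack: … else return False
    | some node =>                                   -- node = stack.pop()
      let rest := stack.dropLast
      if PySem.Set.contains seen node then pvLoopA dep tool fuel rest seen
      else if pvIsRead tool node then true
      else pvLoopA dep tool fuel (rest ++ pvGetDeps dep node) (PySem.Set.add seen node)

def has_read_ancestor_py (step_id : String) (depends_on : List (String × List String)) (tool_by_id : List (String × Option String)) : Bool :=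
  let stack := pvGetDeps depends_on step_id
  let fuel := stack.length + (depends_on.flatMap (·.2)).length * ((depends_on.map (·.2.length)).sum + 1) + 1
  pvLoopA depends_on tool_by_id fuel stack PySem.Set.empty

-- ===== PORT B =====

-- inner:  for c in depends_on.get(n, []): if c not in reached: reached.add(c); new.append(c)
def pvChild : List String → PySem.Set String → List String → PySem.Set String × List String
  | [], reached, acc => (reached, acc)
  | c :: cs, reached, acc =>
    if PySem.Set.contains reached c then pvChild cs reached acc
    else pvChild cs (PySem.Set.add reached c) (acc ++ [c])

-- one level:  for n in frontier: <inner>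
def pvLevel (dep : List (String × List String)) :
    List String → PySem.Set String → List String → PySem.Set String × List String
  | [], reached, acc => (reached, acc)
  | n :: ns, reached, acc =>
    let p := pvChild (pvGetDeps dep n) reached acc
    pvLevel dep ns p.1 p.2

-- while frontier: …  (fuel only makes the recursion total; proven sufficient)
def pvSat (dep : List (String × List String)) :
    Nat → PySem.Set String → List String → PySem.Set String
  | 0, reached, _ => reached
  | fuel + 1, reached, frontier =>
    match frontier with
    | [] => reached
    | _ :: _ =>
      let p := pvLevel dep frontier reached []
      pvSat dep fuel p.1 p.2

def has_read_ancestor_py_alt (step_id : String) (depends_on : List (String × List String)) (tool_by_id : List (String × Option String)) : Bool :=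
  let frontier := pvGetDeps depends_on step_id
  let reached := PySem.Set.ofList frontier
  let fuel := (depends_on.flatMap (·.2)).length + 2
  let final := pvSat depends_on fuel reached frontier
  final.any (fun n => pvIsRead tool_by_id n)

-- ===== PRECONDITION & SPEC =====
def Spec_has_read_ancestor_py (step_id : String) (depends_on : List (String × List String)) (tool_by_id : List (String × Option String)) (out : Bool) : Prop := out = has_read_ancestor_py_alt step_id depends_on tool_by_id
instance (step_id : String) (depends_on : List (String × List String)) (tool_by_id : List (String × Option String)) (out : Bool) : Decidable (Spec_has_read_ancestor_py step_id depends_on tool_by_id out) := by unfold Spec_has_read_ancestor_py; infer_instance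

-- ===== CLAIM (what is proved, stated in full; the proofs are below) =====
def Claim_equal_has_read_ancestor_py : Prop := ∀ (step_id : String) (depends_on : List (String × List String)) (tool_by_id : List (String × Option String)), Dom_has_read_ancestor_py step_id depends_on tool_by_id → Spec_has_read_ancestor_py step_id depends_on tool_by_id (has_read_ancestor_py step_id depends_on tool_by_id)

-- ===== LEMMAS AND PROOFS =====

-- reachability from frontier S along E, every visited node outside `seen`
inductive pvRA (E : String → List String) (seen : String → Prop) (S : List String) : String → Prop
  | base (n : String) (hS : n ∈ S) (hn : ¬ seen n) : pvRA E seen S n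
  | step (m n : String) (hm : pvRA E seen S m) (hE : n ∈ E m) (hn : ¬ seen n) : pvRA E seen S n

-- "some reachable node carries a read tool"
def pvHit (E : String → List String) (seen : String → Prop) (read : String → Bool) (S : List String) : Prop :=
  ∃ n, pvRA E seen S n ∧ read n = true

theorem pvRA_mono_S {E : String → List String} {seen : String → Prop} {S S' : List String} {n : String}
    (hSS : ∀ x, x ∈ S → x ∈ S') (h : pvRA E seen S n) : pvRA E seen S' n := by
  induction h with
  | base n hS hn => exact .base n (hSS n hS) hn
  | step m n _ hE hn ih => exact .step m n ih hE hn

theorem pvRA_anti_seen {E : String → List String} {seen seen' : String → Prop} {S : List String} {n : String}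
    (hs : ∀ x, seen' x → seen x) (h : pvRA E seen S n) : pvRA E seen' S n := by
  induction h with
  | base n hS hn => exact .base n hS (fun hx => hn (hs n hx))
  | step m n _ hE hn ih => exact .step m n ih hE (fun hx => hn (hs n hx))

theorem pvRA_congr {E : String → List String} {seen seen' : String → Prop} {S S' : List String} {n : String}
    (hs : ∀ x, seen x ↔ seen' x) (hSS : ∀ x, x ∈ S ↔ x ∈ S') :
    pvRA E seen S n ↔ pvRA E seen' S' n :=
  ⟨fun h => pvRA_anti_seen (fun x hx => (hs x).2 hx) (pvRA_mono_S (fun x hx => (hSS x).1 hx) h),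
   fun h => pvRA_anti_seen (fun x hx => (hs x).1 hx) (pvRA_mono_S (fun x hx => (hSS x).2 hx) h)⟩

theorem pvRA_all_seen {E : String → List String} {seen : String → Prop} {S : List String} {n : String}
    (hall : ∀ x ∈ S, seen x) (h : pvRA E seen S n) : False := by
  induction h with
  | base n hS hn => exact hn (hall n hS)
  | step m n _ _ _ ih => exact ih

theorem pvRA_append {E : String → List String} {seen : String → Prop} {S1 S2 : List String} {n : String} :
    pvRA E seen (S1 ++ S2) n ↔ pvRA E seen S1 n ∨ pvRA E seen S2 n := by
  constructor
  · intro h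
    induction h with
    | base n hS hn =>
      rcases List.mem_append.1 hS with h1 | h2
      · exact Or.inl (.base n h1 hn)
      · exact Or.inr (.base n h2 hn)
    | step m n _ hE hn ih =>
      rcases ih with h1 | h2
      · exact Or.inl (.step m n h1 hE hn)
      · exact Or.inr (.step m n h2 hE hn)
  · intro h
    rcases h with h | h
    · exact pvRA_mono_S (fun x hx => List.mem_append.2 (Or.inl hx)) h
    · exact pvRA_mono_S (fun x hx => List.mem_append.2 (Or.inr hx)) h

theorem pvRA_cons_seen {E : String → List String} {seen : String → Prop} {S : List String} {node n : String}
    (hnode : seen node) : pvRA E seen (node :: S) n ↔ pvRA E seen S n := by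
  have : node :: S = [node] ++ S := rfl
  rw [this, pvRA_append]
  constructor
  · rintro (h | h)
    · exact absurd h (fun h => pvRA_all_seen (fun x hx => by rw [List.mem_singleton.1 hx]; exact hnode) h)
    · exact h
  · exact Or.inr

-- the key DFS identity: expanding an unseen node of the frontier
theorem pvRA_expand {E : String → List String} {seen : String → Prop} {S : List String} {node n : String}
    (hnode : ¬ seen node) :
    pvRA E seen (node :: S) n ↔ (n = node ∨ pvRA E (fun x => x = node ∨ seen x) (E node ++ S) n) := by
  constructor
  · intro h
    induction h with
    | base n hS hn =>
      rcases List.mem_cons.1 hS with rfl | hS'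
      · exact Or.inl rfl
      · by_cases hn2 : n = node
        · exact Or.inl hn2
        · exact Or.inr (.base n (List.mem_append.2 (Or.inr hS')) (by tauto))
    | step m n hm hE hn ih =>
      by_cases hn2 : n = node
      · exact Or.inl hn2
      · rcases ih with rfl | ih'
        · exact Or.inr (.base n (List.mem_append.2 (Or.inl hE)) (by tauto))
        · exact Or.inr (.step m n ih' hE (by tauto))
  · intro h
    rcases h with rfl | h
    · exact .base n (List.mem_cons_self) hnode
    · induction h with
      | base m hS hm =>
        rcases List.mem_append.1 hS with h1 | h2
        · exact .step node m (.base node List.mem_cons_self hnode) h1 (by tauto)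
        · exact .base m (List.mem_cons.2 (Or.inr h2)) (by tauto)
      | step m n hm hE hn ih =>
        exact .step m n ih hE (by tauto)

theorem pvHit_expand {E : String → List String} {seen : String → Prop} {read : String → Bool}
    {S : List String} {node : String} (hnode : ¬ seen node) (hread : read node = false) :
    pvHit E seen read (node :: S) ↔ pvHit E (fun x => x = node ∨ seen x) read (E node ++ S) := by
  constructor
  · rintro ⟨n, hra, hr⟩
    rcases (pvRA_expand hnode).1 hra with rfl | h
    · rw [hr] at hread; cases hread
    · exact ⟨n, h, hr⟩
  · rintro ⟨n, hra, hr⟩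
    exact ⟨n, (pvRA_expand hnode).2 (Or.inr hra), hr⟩

theorem pvGetDeps_subset (dep : List (String × List String)) (n : String) :
    ∀ x ∈ pvGetDeps dep n, x ∈ dep.flatMap (·.2) := by
  induction dep with
  | nil =>
    intro x hx
    have h0 : (PySem.Dict.mk ([] : List (String × List String))).get? n = none := rfl
    rw [pvGetDeps, PySem.Dict.getD_eq_get?_getD, h0] at hx
    simp at hx
  | cons p rest ih =>
    intro x hx
    obtain ⟨k, v⟩ := p
    rw [pvGetDeps, PySem.Dict.getD_eq_get?_getD, PySem.Dict.get?_mk_cons] at hx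
    by_cases h : k == n
    · simp [h] at hx
      exact List.mem_flatMap.2 ⟨(k, v), List.mem_cons_self, hx⟩
    · simp [h] at hx
      have := ih x (by rw [pvGetDeps, PySem.Dict.getD_eq_get?_getD]; exact hx)
      rcases List.mem_flatMap.1 this with ⟨q, hq, hxq⟩
      exact List.mem_flatMap.2 ⟨q, List.mem_cons_of_mem _ hq, hxq⟩

theorem pvGetDeps_len (dep : List (String × List String)) (n : String) :
    (pvGetDeps dep n).length ≤ (dep.map (·.2.length)).sum := by
  induction dep with
  | nil =>
    have h0 : (PySem.Dict.mk ([] : List (String × List String))).get? n = none := rfl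
    rw [pvGetDeps, PySem.Dict.getD_eq_get?_getD, h0]
    simp
  | cons p rest ih =>
    obtain ⟨k, v⟩ := p
    rw [pvGetDeps, PySem.Dict.getD_eq_get?_getD, PySem.Dict.get?_mk_cons]
    by_cases h : k == n
    · simp [h]
    · have h' : (k == n) = false := by simpa using h
      simp only [h', Bool.false_eq_true, if_false]
      rw [pvGetDeps, PySem.Dict.getD_eq_get?_getD] at ih
      simp only [List.map_cons, List.sum_cons]
      omega

-- ===== the counting measure =====

def pvK (U : List String) (seen : PySem.Set String) : Nat :=
  (U.toFinset.filter (fun x => x ∉ seen)).card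

theorem pvK_le_length (U : List String) (seen : PySem.Set String) : pvK U seen ≤ U.length := by
  calc (U.toFinset.filter (fun x => x ∉ seen)).card ≤ U.toFinset.card := Finset.card_filter_le _ _
    _ ≤ U.length := U.toFinset_card_le

theorem pvK_lt (U : List String) {s s' : PySem.Set String} (h : ∀ x, x ∈ s → x ∈ s')
    {x : String} (hxU : x ∈ U) (hxs : x ∉ s) (hxs' : x ∈ s') : pvK U s' < pvK U s := by
  apply Finset.card_lt_card
  constructor
  · intro y hy
    simp only [Finset.mem_filter] at hy ⊢
    exact ⟨hy.1, fun hm => hy.2 (h y hm)⟩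
  · intro hsub
    have := hsub (by simp only [Finset.mem_filter]; exact ⟨List.mem_toFinset.2 hxU, hxs⟩)
    simp only [Finset.mem_filter] at this
    exact this.2 hxs'

-- ===== characterisation of A's loop =====

theorem pvLoopA_iff (dep : List (String × List String)) (tool : List (String × Option String)) :
    ∀ (fuel : Nat) (stack : List String) (seen : PySem.Set String),
    stack.length + pvK (dep.flatMap (·.2)) seen * ((dep.map (·.2.length)).sum + 1) < fuel →
    (∀ x ∈ stack, x ∈ dep.flatMap (·.2)) →
    (pvLoopA dep tool fuel stack seen = true ↔
      pvHit (pvGetDeps dep) (fun x => x ∈ seen) (pvIsRead tool) stack) := by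
  intro fuel
  induction fuel with
  | zero => intro stack seen hm; omega
  | succ fuel ih =>
    intro stack seen hm hU
    rcases hl : stack.getLast? with _ | node
    · -- stack = []
      have hnil : stack = [] := List.getLast?_eq_none_iff.1 hl
      subst hnil
      simp only [pvLoopA, List.getLast?_nil]
      constructor
      · intro h; cases h
      · rintro ⟨n, hra, _⟩
        exact absurd (pvRA_all_seen (fun x hx => absurd hx List.not_mem_nil) hra) (fun h => h)
    · obtain ⟨rest, rfl⟩ : ∃ rest, stack = rest ++ [node] := by
        rcases List.getLast?_eq_some_iff.1 hl with ⟨l', hl'⟩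
        exact ⟨l', hl'⟩
      have hdrop : (rest ++ [node]).dropLast = rest := List.dropLast_concat ..
      have hlen : (rest ++ [node]).length = rest.length + 1 := by simp
      have hnodeU : node ∈ dep.flatMap (·.2) := hU node (by simp)
      have hmemc : ∀ x, x ∈ rest ++ [node] ↔ x ∈ node :: rest := by
        intro x; simp [or_comm]
      have hhitc : pvHit (pvGetDeps dep) (fun x => x ∈ seen) (pvIsRead tool) (rest ++ [node]) ↔
          pvHit (pvGetDeps dep) (fun x => x ∈ seen) (pvIsRead tool) (node :: rest) :=
        exists_congr fun n => and_congr_left' (pvRA_congr (fun _ => Iff.rfl) hmemc)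
      rw [hhitc]
      by_cases hseen : node ∈ seen
      · have hc : PySem.Set.contains seen node = true := (PySem.Set.contains_iff _ _).2 hseen
        have hdef : pvLoopA dep tool (fuel + 1) (rest ++ [node]) seen = pvLoopA dep tool fuel rest seen := by
          simp only [pvLoopA, hl, hdrop, hc, if_true]
        rw [hdef, ih rest seen (by omega) (fun x hx => hU x (by simp [hx]))]
        exact (exists_congr fun n => and_congr_left' (pvRA_cons_seen hseen)).symm
      · have hc : PySem.Set.contains seen node = false := by
          rcases h : PySem.Set.contains seen node with _ | _
          · rfl
          · exact absurd ((PySem.Set.contains_iff _ _).1 h) hseen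
        by_cases hread : pvIsRead tool node = true
        · have hdef : pvLoopA dep tool (fuel + 1) (rest ++ [node]) seen = true := by
            simp only [pvLoopA, hl, hdrop, hc, Bool.false_eq_true, if_false, hread, if_true]
          rw [hdef]
          simp only [true_iff]
          exact ⟨node, .base node List.mem_cons_self hseen, hread⟩
        · have hread' : pvIsRead tool node = false := by
            rcases h : pvIsRead tool node with _ | _
            · rfl
            · exact absurd h hread
          have hdef : pvLoopA dep tool (fuel + 1) (rest ++ [node]) seen
              = pvLoopA dep tool fuel (rest ++ pvGetDeps dep node) (PySem.Set.add seen node) := by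
            simp only [pvLoopA, hl, hdrop, hc, Bool.false_eq_true, if_false, hread']
          -- measure bookkeeping
          have hklt : pvK (dep.flatMap (·.2)) (PySem.Set.add seen node) < pvK (dep.flatMap (·.2)) seen :=
            pvK_lt _ (fun x hx => (PySem.Set.mem_add _ _ _).2 (Or.inl hx)) hnodeU hseen
              ((PySem.Set.mem_add _ _ _).2 (Or.inr rfl))
          have hElen : (pvGetDeps dep node).length ≤ (dep.map (·.2.length)).sum := pvGetDeps_len dep node
          have hmul : pvK (dep.flatMap (·.2)) (PySem.Set.add seen node) * ((dep.map (·.2.length)).sum + 1)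
              + ((dep.map (·.2.length)).sum + 1)
              ≤ pvK (dep.flatMap (·.2)) seen * ((dep.map (·.2.length)).sum + 1) := by
            have h1 : pvK (dep.flatMap (·.2)) (PySem.Set.add seen node) + 1 ≤ pvK (dep.flatMap (·.2)) seen := hklt
            calc pvK (dep.flatMap (·.2)) (PySem.Set.add seen node) * ((dep.map (·.2.length)).sum + 1)
                + ((dep.map (·.2.length)).sum + 1)
                = (pvK (dep.flatMap (·.2)) (PySem.Set.add seen node) + 1) * ((dep.map (·.2.length)).sum + 1) := by ring
              _ ≤ pvK (dep.flatMap (·.2)) seen * ((dep.map (·.2.length)).sum + 1) :=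
                  Nat.mul_le_mul_right _ h1
          have hm' : (rest ++ pvGetDeps dep node).length
              + pvK (dep.flatMap (·.2)) (PySem.Set.add seen node) * ((dep.map (·.2.length)).sum + 1) < fuel := by
            rw [List.length_append]
            omega
          have hU' : ∀ x ∈ rest ++ pvGetDeps dep node, x ∈ dep.flatMap (·.2) := by
            intro x hx
            rcases List.mem_append.1 hx with h | h
            · exact hU x (by simp [h])
            · exact pvGetDeps_subset dep node x h
          rw [hdef, ih _ _ hm' hU']
          rw [pvHit_expand hseen hread']
          refine (exists_congr fun n => and_congr_left' (pvRA_congr ?_ ?_)).symm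
          · intro x
            rw [PySem.Set.mem_add _ _ _]
            exact or_comm
          · intro x; simp [or_comm]

-- ===== characterisation of B's saturation =====

theorem pvChild_spec (cs : List String) (reached : PySem.Set String) (acc : List String) :
    (∀ x ∈ acc, x ∈ (pvChild cs reached acc).2) ∧
    (∀ x, x ∈ (pvChild cs reached acc).1 ↔ x ∈ reached ∨ x ∈ cs) ∧
    (∀ x ∈ (pvChild cs reached acc).2, x ∈ acc ∨ x ∈ cs) ∧
    ((∀ x ∈ acc, x ∈ reached) → ∀ x ∈ (pvChild cs reached acc).2, x ∈ (pvChild cs reached acc).1) ∧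
    (∀ x ∈ (pvChild cs reached acc).1, x ∈ reached ∨ x ∈ (pvChild cs reached acc).2) ∧
    (∀ x ∈ (pvChild cs reached acc).2, x ∈ acc ∨ x ∉ reached) := by
  induction cs generalizing reached acc with
  | nil =>
    refine ⟨fun x h => h, fun x => Iff.intro Or.inl (fun h => ?_), fun x h => Or.inl h,
      fun h => h, fun x h => Or.inl h, fun x h => Or.inl h⟩
    rcases h with h | h
    · exact h
    · cases h
  | cons c cs ih =>
    by_cases hc : c ∈ reached
    · have hcc : PySem.Set.contains reached c = true := (PySem.Set.contains_iff _ _).2 hc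
      have hdef : pvChild (c :: cs) reached acc = pvChild cs reached acc := by
        simp only [pvChild, hcc, if_true]
      rw [hdef]
      obtain ⟨i0, i1, i2, i3, i4, i5⟩ := ih reached acc
      refine ⟨i0, ?_, ?_, i3, i4, i5⟩
      · intro x
        rw [i1 x]
        constructor
        · rintro (h | h)
          · exact Or.inl h
          · exact Or.inr (List.mem_cons_of_mem _ h)
        · rintro (h | h)
          · exact Or.inl h
          · rcases List.mem_cons.1 h with rfl | h'
            · exact Or.inl hc
            · exact Or.inr h'
      · intro x hx
        rcases i2 x hx with h | h
        · exact Or.inl h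
        · exact Or.inr (List.mem_cons_of_mem _ h)
    · have hcc : PySem.Set.contains reached c = false := by
        rcases h : PySem.Set.contains reached c with _ | _
        · rfl
        · exact absurd ((PySem.Set.contains_iff _ _).1 h) hc
      have hdef : pvChild (c :: cs) reached acc
          = pvChild cs (PySem.Set.add reached c) (acc ++ [c]) := by
        simp only [pvChild, hcc, Bool.false_eq_true, if_false]
      rw [hdef]
      obtain ⟨i0, i1, i2, i3, i4, i5⟩ := ih (PySem.Set.add reached c) (acc ++ [c])
      refine ⟨?_, ?_, ?_, ?_, ?_, ?_⟩
      · intro x hx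
        exact i0 x (List.mem_append.2 (Or.inl hx))
      · intro x
        rw [i1 x, PySem.Set.mem_add]
        constructor
        · rintro ((h | h) | h)
          · exact Or.inl h
          · exact Or.inr (h ▸ List.mem_cons_self)
          · exact Or.inr (List.mem_cons_of_mem _ h)
        · rintro (h | h)
          · exact Or.inl (Or.inl h)
          · rcases List.mem_cons.1 h with rfl | h'
            · exact Or.inl (Or.inr rfl)
            · exact Or.inr h'
      · intro x hx
        rcases i2 x hx with h | h
        · rcases List.mem_append.1 h with h' | h'
          · exact Or.inl h'
          · exact Or.inr (by rw [List.mem_singleton.1 h']; exact List.mem_cons_self)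
        · exact Or.inr (List.mem_cons_of_mem _ h)
      · intro hacc
        refine i3 ?_
        intro x hx
        rcases List.mem_append.1 hx with h' | h'
        · exact (PySem.Set.mem_add _ _ _).2 (Or.inl (hacc x h'))
        · exact (PySem.Set.mem_add _ _ _).2 (Or.inr (List.mem_singleton.1 h'))
      · intro x hx
        rcases i4 x hx with h | h
        · rcases (PySem.Set.mem_add _ _ _).1 h with h' | h'
          · exact Or.inl h'
          · exact Or.inr (i0 x (List.mem_append.2 (Or.inr (by rw [h']; exact List.mem_singleton_self _))))
        · exact Or.inr h
      · intro x hx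
        rcases i5 x hx with h | h
        · rcases List.mem_append.1 h with h' | h'
          · exact Or.inl h'
          · exact Or.inr (by rw [List.mem_singleton.1 h']; exact hc)
        · exact Or.inr (fun hm => h ((PySem.Set.mem_add _ _ _).2 (Or.inl hm)))

theorem pvLevel_spec (dep : List (String × List String)) :
    ∀ (F : List String) (reached : PySem.Set String) (acc : List String),
    (∀ x ∈ acc, x ∈ (pvLevel dep F reached acc).2) ∧
    (∀ x, x ∈ (pvLevel dep F reached acc).1 ↔ x ∈ reached ∨ ∃ n ∈ F, x ∈ pvGetDeps dep n) ∧
    (∀ x ∈ (pvLevel dep F reached acc).2, x ∈ acc ∨ ∃ n ∈ F, x ∈ pvGetDeps dep n) ∧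
    ((∀ x ∈ acc, x ∈ reached) → ∀ x ∈ (pvLevel dep F reached acc).2, x ∈ (pvLevel dep F reached acc).1) ∧
    (∀ x ∈ (pvLevel dep F reached acc).1, x ∈ reached ∨ x ∈ (pvLevel dep F reached acc).2) ∧
    (∀ x ∈ (pvLevel dep F reached acc).2, x ∈ acc ∨ x ∉ reached) := by
  intro F
  induction F with
  | nil =>
    intro reached acc
    exact ⟨fun x h => h, fun x => ⟨Or.inl, fun h => by rcases h with h | ⟨m, hm, _⟩; exact h; cases hm⟩,
      fun x h => Or.inl h, fun h => h, fun x h => Or.inl h, fun x h => Or.inl h⟩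
  | cons n ns ih =>
    intro reached acc
    have hdef : pvLevel dep (n :: ns) reached acc
        = pvLevel dep ns (pvChild (pvGetDeps dep n) reached acc).1 (pvChild (pvGetDeps dep n) reached acc).2 := rfl
    obtain ⟨c0, c1, c2, c3, c4, c5⟩ := pvChild_spec (pvGetDeps dep n) reached acc
    obtain ⟨l0, l1, l2, l3, l4, l5⟩ := ih (pvChild (pvGetDeps dep n) reached acc).1 (pvChild (pvGetDeps dep n) reached acc).2
    rw [hdef]
    refine ⟨?_, ?_, ?_, ?_, ?_, ?_⟩
    · intro x hx
      exact l0 x (c0 x hx)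
    · intro x
      rw [l1 x, c1 x]
      constructor
      · rintro ((h | h) | ⟨m, hm, hxm⟩)
        · exact Or.inl h
        · exact Or.inr ⟨n, List.mem_cons_self, h⟩
        · exact Or.inr ⟨m, List.mem_cons_of_mem _ hm, hxm⟩
      · rintro (h | ⟨m, hm, hxm⟩)
        · exact Or.inl (Or.inl h)
        · rcases List.mem_cons.1 hm with rfl | hm'
          · exact Or.inl (Or.inr hxm)
          · exact Or.inr ⟨m, hm', hxm⟩
    · intro x hx
      rcases l2 x hx with h | ⟨m, hm, hxm⟩
      · rcases c2 x h with h' | h'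
        · exact Or.inl h'
        · exact Or.inr ⟨n, List.mem_cons_self, h'⟩
      · exact Or.inr ⟨m, List.mem_cons_of_mem _ hm, hxm⟩
    · intro hacc
      exact l3 (c3 hacc)
    · intro x hx
      rcases l4 x hx with h | h
      · rcases c4 x h with h' | h'
        · exact Or.inl h'
        · exact Or.inr (l0 x h')
      · exact Or.inr h
    · intro x hx
      rcases l5 x hx with h | h
      · rcases c5 x h with h' | h'
        · exact Or.inl h'
        · exact Or.inr h'
      · exact Or.inr (fun hm => h ((c1 x).2 (Or.inl hm)))

theorem pvSat_nil (dep : List (String × List String)) (fuel : Nat) (reached : PySem.Set String) :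
    pvSat dep fuel reached [] = reached := by
  cases fuel <;> rfl

theorem pvClosed_complete {E : String → List String} {S : List String} {R : List String}
    (hS : ∀ x ∈ S, x ∈ R) (hcl : ∀ x ∈ R, ∀ c ∈ E x, c ∈ R) :
    ∀ n, pvRA E (fun _ => False) S n → n ∈ R := by
  intro n h
  induction h with
  | base n hSn _ => exact hS n hSn
  | step m n _ hE _ ih => exact hcl m ih n hE

theorem pvSat_spec (dep : List (String × List String)) (S : List String) :
    ∀ (fuel : Nat) (reached : PySem.Set String) (frontier : List String),
    pvK (dep.flatMap (·.2)) reached + 2 ≤ fuel →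
    (∀ x ∈ S, x ∈ reached) →
    (∀ x ∈ frontier, x ∈ reached) →
    (∀ x ∈ reached, pvRA (pvGetDeps dep) (fun _ => False) S x) →
    (∀ x ∈ reached, x ∉ frontier → ∀ c ∈ pvGetDeps dep x, c ∈ reached) →
    ((∀ x ∈ pvSat dep fuel reached frontier, pvRA (pvGetDeps dep) (fun _ => False) S x) ∧
     (∀ x, pvRA (pvGetDeps dep) (fun _ => False) S x → x ∈ pvSat dep fuel reached frontier)) := by
  intro fuel
  induction fuel with
  | zero => intro reached frontier hf; omega
  | succ fuel ih =>
    intro reached frontier hf hS hF hsound hclosed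
    match frontier with
    | [] =>
      rw [pvSat_nil]
      exact ⟨hsound, pvClosed_complete hS (fun x hx => hclosed x hx (by simp)) ⟩
    | f :: fs =>
      have hdef : pvSat dep (fuel + 1) reached (f :: fs)
          = pvSat dep fuel (pvLevel dep (f :: fs) reached []).1 (pvLevel dep (f :: fs) reached []).2 := rfl
      rw [hdef]
      obtain ⟨l0, l1, l2, l3, l4, l5⟩ := pvLevel_spec dep (f :: fs) reached []
      set r' := (pvLevel dep (f :: fs) reached []).1 with hr'
      set new := (pvLevel dep (f :: fs) reached []).2 with hnew
      -- invariants for the next iteration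
      have hsub : ∀ x ∈ reached, x ∈ r' := fun x hx => (l1 x).2 (Or.inl hx)
      have hS' : ∀ x ∈ S, x ∈ r' := fun x hx => hsub x (hS x hx)
      have hF' : ∀ x ∈ new, x ∈ r' := l3 (by simp)
      have hsound' : ∀ x ∈ r', pvRA (pvGetDeps dep) (fun _ => False) S x := by
        intro x hx
        rcases (l1 x).1 hx with h | ⟨m, hm, hxm⟩
        · exact hsound x h
        · exact .step m x (hsound m (hF m hm)) hxm (fun h => h)
      have hclosed' : ∀ x ∈ r', x ∉ new → ∀ c ∈ pvGetDeps dep x, c ∈ r' := by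
        intro x hx hxn c hc
        rcases l4 x hx with h | h
        · by_cases hxf : x ∈ f :: fs
          · exact (l1 c).2 (Or.inr ⟨x, hxf, hc⟩)
          · exact hsub c (hclosed x h hxf c hc)
        · exact absurd h hxn
      match hnl : new with
      | [] =>
        rw [pvSat_nil]
        exact ⟨hsound', pvClosed_complete hS'
          (fun x hx => hclosed' x hx List.not_mem_nil) ⟩
      | y :: ys =>
        have hyy : y ∈ y :: ys := List.mem_cons_self
        have hyU : y ∈ dep.flatMap (·.2) := by
          rcases l2 y hyy with h | ⟨m, _, hym⟩
          · cases h
          · exact pvGetDeps_subset dep m y hym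
        have hynr : y ∉ reached := by
          rcases l5 y hyy with h | h
          · cases h
          · exact h
        have hyr' : y ∈ r' := hF' y hyy
        have hk : pvK (dep.flatMap (·.2)) r' < pvK (dep.flatMap (·.2)) reached :=
          pvK_lt _ hsub hyU hynr hyr'
        exact ih r' (y :: ys) (by omega) hS' hF' hsound' hclosed'

-- ===== VERDICT (by name: the statement is the Claim_ definition above) =====
theorem has_read_ancestor_py_spec : Claim_equal_has_read_ancestor_py := by
  intro step_id depends_on tool_by_id _
  unfold Spec_has_read_ancestor_py
  have hSU : ∀ x ∈ pvGetDeps depends_on step_id, x ∈ depends_on.flatMap (·.2) :=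
    pvGetDeps_subset depends_on step_id
  have hEmpty : ∀ x : String, x ∈ (PySem.Set.empty : PySem.Set String) ↔ False := by
    intro x
    simp [PySem.Set.empty]
  -- A computes pvHit
  have hA : has_read_ancestor_py step_id depends_on tool_by_id = true ↔
      pvHit (pvGetDeps depends_on) (fun _ => False) (pvIsRead tool_by_id) (pvGetDeps depends_on step_id) := by
    show pvLoopA depends_on tool_by_id
        ((pvGetDeps depends_on step_id).length
          + (depends_on.flatMap (·.2)).length * ((depends_on.map (·.2.length)).sum + 1) + 1)
        (pvGetDeps depends_on step_id) PySem.Set.empty = true ↔ _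
    rw [pvLoopA_iff depends_on tool_by_id _ _ _ ?_ hSU]
    · exact exists_congr fun n => and_congr_left' (pvRA_congr (fun x => hEmpty x) (fun _ => Iff.rfl))
    · have h1 := pvK_le_length (depends_on.flatMap (·.2)) PySem.Set.empty
      have h2 := Nat.mul_le_mul_right ((depends_on.map (·.2.length)).sum + 1) h1
      omega
  -- B computes pvHit
  obtain ⟨F1, F2⟩ := pvSat_spec depends_on (pvGetDeps depends_on step_id)
      ((depends_on.flatMap (·.2)).length + 2)
      (PySem.Set.ofList (pvGetDeps depends_on step_id)) (pvGetDeps depends_on step_id)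
      (by have := pvK_le_length (depends_on.flatMap (·.2)) (PySem.Set.ofList (pvGetDeps depends_on step_id)); omega)
      (fun x hx => (PySem.Set.mem_ofList _ _).2 hx)
      (fun x hx => (PySem.Set.mem_ofList _ _).2 hx)
      (fun x hx => .base x ((PySem.Set.mem_ofList _ _).1 hx) (fun h => h))
      (fun x hx hxf => absurd ((PySem.Set.mem_ofList _ _).1 hx) hxf)
  have hB : has_read_ancestor_py_alt step_id depends_on tool_by_id = true ↔
      pvHit (pvGetDeps depends_on) (fun _ => False) (pvIsRead tool_by_id) (pvGetDeps depends_on step_id) := by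
    show (pvSat depends_on ((depends_on.flatMap (·.2)).length + 2)
        (PySem.Set.ofList (pvGetDeps depends_on step_id)) (pvGetDeps depends_on step_id)).any
        (fun n => pvIsRead tool_by_id n) = true ↔ _
    rw [List.any_eq_true]
    constructor
    · rintro ⟨n, hn, hr⟩
      exact ⟨n, F1 n hn, hr⟩
    · rintro ⟨n, hra, hr⟩
      exact ⟨n, F2 n hra, hr⟩
  have hbool : ∀ a b : Bool, (a = true ↔ b = true) → a = b := by decide
  exact hbool _ _ (hA.trans hB.symm)
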